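-- pv_equiv track=rewrite | github.com/kleamp1e/ocaz | ocaz-sandbox/src/ocaz_sandbox/video_digester.py | expand_frame_indexes
-- ===== SOURCE A (Python) =====
-- import math
--
-- def expand_frame_indexes(key_frame_indexes, frames_per_block, number_of_frames):
--     frame_indexes = set()
--
--     for key_frame_index in key_frame_indexes:
--         for n in range(frames_per_block):
--             frame_index = math.floor(key_frame_index - frames_per_block / 2 + n)
--             if 0 <= frame_index <= number_of_frames - 1:
--                 frame_indexes.add(frame_index)
--
--     return sorted(list(frame_indexes))
-- ===== SOURCE B (Python) =====
-- def expand_frame_indexes(key_frame_indexes, frames_per_block, number_of_frames):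
--     if frames_per_block <= 0 or number_of_frames <= 0:
--         return []
--     half = (frames_per_block + 1) // 2
--     merged = []  # disjoint, non-adjacent intervals [lo, hi], in increasing order
--     for k in sorted(set(key_frame_indexes)):
--         lo = max(0, k - half)
--         hi = min(number_of_frames - 1, k - half + frames_per_block - 1)
--         if lo > hi:
--             continue
--         if merged and lo <= merged[-1][1] + 1:
--             if hi > merged[-1][1]:
--                 merged[-1][1] = hi
--         else:
--             merged.append([lo, hi])
--     out = []
--     for lo, hi in merged:
--         out.extend(range(lo, hi + 1))
--     return out
-- ===== Notes on version B (the rewrite author's own statement) =====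
-- stated objective: faster
-- what changed: Instead of enumerating every frame index of every key frame into a set and sorting it, B sorts the distinct key frames once, merges their clamped contiguous intervals in one pass, and emits each run directly.
import Mathlib
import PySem

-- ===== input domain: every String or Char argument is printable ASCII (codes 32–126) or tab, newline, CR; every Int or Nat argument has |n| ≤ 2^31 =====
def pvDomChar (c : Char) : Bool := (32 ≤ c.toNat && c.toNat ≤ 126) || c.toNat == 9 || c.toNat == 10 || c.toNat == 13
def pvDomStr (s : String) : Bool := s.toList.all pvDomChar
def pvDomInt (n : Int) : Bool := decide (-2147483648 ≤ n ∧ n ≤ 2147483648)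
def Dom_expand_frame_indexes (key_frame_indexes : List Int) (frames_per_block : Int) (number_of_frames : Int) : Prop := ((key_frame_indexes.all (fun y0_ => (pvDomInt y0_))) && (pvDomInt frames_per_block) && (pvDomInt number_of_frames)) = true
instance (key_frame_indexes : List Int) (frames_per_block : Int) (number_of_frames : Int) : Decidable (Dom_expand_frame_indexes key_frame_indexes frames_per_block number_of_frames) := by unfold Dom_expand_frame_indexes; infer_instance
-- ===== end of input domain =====

-- B replaces A's per-key-frame enumeration of every frame index (a set plus a final sort) by sorting
-- the key frames once and merging their clamped contiguous intervals, emitting each output run directly.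

-- ===== PORT A =====
-- math.floor(key_frame_index - frames_per_block / 2 + n): on Dom all quantities are
-- |…| ≤ 3·2^31 ≪ 2^53, so the float arithmetic is exact and the floor equals
-- key_frame_index + n + floor(-frames_per_block / 2) = key_frame_index + ((-frames_per_block) // 2) + n.
def expand_frame_indexes (key_frame_indexes : List Int) (frames_per_block : Int) (number_of_frames : Int) : List Int :=
  let frame_indexes : PySem.Set Int :=
    key_frame_indexes.foldl (fun s key_frame_index =>
      (PySem.List.pyRange 0 frames_per_block 1).foldl (fun s n =>
        let frame_index := key_frame_index + PySem.Int.floordiv (-frames_per_block) 2 + n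
        if 0 ≤ frame_index ∧ frame_index ≤ number_of_frames - 1 then PySem.Set.add s frame_index else s) s)
      PySem.Set.empty
  PySem.List.sorted frame_indexes (fun x => x) false

-- ===== PORT B =====
-- merged intervals are kept in REVERSE order: the list head is Python's merged[-1],
-- so 'merged[-1][1] = hi' / 'merged.append([lo, hi])' act on the head.
def pvMergeStep (m : List (Int × Int)) (lo hi : Int) : List (Int × Int) :=
  match m with
  | (plo, phi) :: rest =>
      if lo ≤ phi + 1 then
        (if hi > phi then (plo, hi) :: rest else (plo, phi) :: rest)
      else (lo, hi) :: (plo, phi) :: rest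
  | [] => [(lo, hi)]

def expand_frame_indexes_alt (key_frame_indexes : List Int) (frames_per_block : Int) (number_of_frames : Int) : List Int :=
  if frames_per_block ≤ 0 ∨ number_of_frames ≤ 0 then []
  else
    let half := PySem.Int.floordiv (frames_per_block + 1) 2
    let merged := (PySem.List.sorted (PySem.Set.ofList key_frame_indexes) (fun x => x) false).foldl
      (fun m k =>
        let lo := max 0 (k - half)
        let hi := min (number_of_frames - 1) (k - half + frames_per_block - 1)
        if lo > hi then m else pvMergeStep m lo hi) []
    merged.reverse.foldl (fun out p => out ++ PySem.List.pyRange p.1 (p.2 + 1) 1) []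

-- ===== PRECONDITION & SPEC =====
def Spec_expand_frame_indexes (key_frame_indexes : List Int) (frames_per_block : Int) (number_of_frames : Int) (out : List Int) : Prop := out = expand_frame_indexes_alt key_frame_indexes frames_per_block number_of_frames
instance (key_frame_indexes : List Int) (frames_per_block : Int) (number_of_frames : Int) (out : List Int) : Decidable (Spec_expand_frame_indexes key_frame_indexes frames_per_block number_of_frames out) := by unfold Spec_expand_frame_indexes; infer_instance

-- ===== CLAIM (what is proved, stated in full; the proofs are below) =====
def Claim_equal_expand_frame_indexes : Prop := ∀ (key_frame_indexes : List Int) (frames_per_block : Int) (number_of_frames : Int), Dom_expand_frame_indexes key_frame_indexes frames_per_block number_of_frames → Spec_expand_frame_indexes key_frame_indexes frames_per_block number_of_frames (expand_frame_indexes key_frame_indexes frames_per_block number_of_frames)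

-- ===== LEMMAS AND PROOFS =====

-- clamped interval of one key frame
def pvLo (half k : Int) : Int := max 0 (k - half)
def pvHi (half nf fpb k : Int) : Int := min (nf - 1) (k - half + fpb - 1)

-- membership in a list of intervals
def pvIvMem (m : List (Int × Int)) (x : Int) : Prop := ∃ p ∈ m, p.1 ≤ x ∧ x ≤ p.2

-- reversed interval list wellformedness: strictly separated, nonempty intervals
def pvGood (m : List (Int × Int)) : Prop :=
  m.Pairwise (fun a b => b.2 + 2 ≤ a.1) ∧ ∀ p ∈ m, p.1 ≤ p.2

-- generic membership of a fold whose step adds elements characterised by Q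
theorem pv_mem_foldl_of_step {β : Type} (Q : β → Int → Prop)
    (f : PySem.Set Int → β → PySem.Set Int)
    (hf : ∀ s b x, x ∈ f s b ↔ x ∈ s ∨ Q b x) :
    ∀ (l : List β) (s : PySem.Set Int) (x : Int),
      x ∈ l.foldl f s ↔ x ∈ s ∨ ∃ b ∈ l, Q b x := by
  intro l
  induction l with
  | nil => simp
  | cons b t ih =>
    intro s x
    simp only [List.foldl_cons, ih, hf, List.mem_cons]
    constructor
    · rintro ((h | h) | ⟨c, hc, hq⟩)
      · exact Or.inl h
      · exact Or.inr ⟨b, Or.inl rfl, h⟩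
      · exact Or.inr ⟨c, Or.inr hc, hq⟩
    · rintro (h | ⟨c, (rfl | hc), hq⟩)
      · exact Or.inl (Or.inl h)
      · exact Or.inl (Or.inr hq)
      · exact Or.inr ⟨c, hc, hq⟩

-- membership in A's inner loop step
theorem pv_mem_inner (fpb nf : Int) (k : Int) (s : PySem.Set Int) (x : Int) :
    x ∈ (PySem.List.pyRange 0 fpb 1).foldl (fun s n =>
        let e := k + PySem.Int.floordiv (-fpb) 2 + n
        if 0 ≤ e ∧ e ≤ nf - 1 then PySem.Set.add s e else s) s ↔
      x ∈ s ∨ ∃ n, (0 ≤ n ∧ n < fpb) ∧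
        ((0 ≤ k + PySem.Int.floordiv (-fpb) 2 + n ∧ k + PySem.Int.floordiv (-fpb) 2 + n ≤ nf - 1)
          ∧ x = k + PySem.Int.floordiv (-fpb) 2 + n) := by
  rw [pv_mem_foldl_of_step
      (Q := fun n x => (0 ≤ k + PySem.Int.floordiv (-fpb) 2 + n ∧ k + PySem.Int.floordiv (-fpb) 2 + n ≤ nf - 1)
          ∧ x = k + PySem.Int.floordiv (-fpb) 2 + n)]
  · simp [PySem.List.mem_pyRange_one]
  · intro s n x
    dsimp only
    split_ifs with h
    · rw [PySem.Set.mem_add]; tauto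
    · tauto

-- membership in A's set
theorem pv_mem_aset (keys : List Int) (fpb nf : Int) (x : Int) :
    x ∈ keys.foldl (fun s k =>
        (PySem.List.pyRange 0 fpb 1).foldl (fun s n =>
          let e := k + PySem.Int.floordiv (-fpb) 2 + n
          if 0 ≤ e ∧ e ≤ nf - 1 then PySem.Set.add s e else s) s) PySem.Set.empty ↔
      ∃ k ∈ keys, k + PySem.Int.floordiv (-fpb) 2 ≤ x ∧ x ≤ k + PySem.Int.floordiv (-fpb) 2 + fpb - 1
        ∧ 0 ≤ x ∧ x ≤ nf - 1 := by
  rw [pv_mem_foldl_of_step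
      (Q := fun k x => k + PySem.Int.floordiv (-fpb) 2 ≤ x ∧ x ≤ k + PySem.Int.floordiv (-fpb) 2 + fpb - 1
        ∧ 0 ≤ x ∧ x ≤ nf - 1)]
  · simp [PySem.Set.empty]
  · intro s k y
    rw [pv_mem_inner]
    constructor
    · rintro (h | ⟨n, hn, hcond, rfl⟩)
      · exact Or.inl h
      · exact Or.inr (by omega)
    · rintro (h | h)
      · exact Or.inl h
      · exact Or.inr ⟨y - (k + PySem.Int.floordiv (-fpb) 2), by omega⟩

-- A's set has no duplicates
theorem pv_nodup_aset (keys : List Int) (fpb nf : Int) :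
    (keys.foldl (fun s k =>
        (PySem.List.pyRange 0 fpb 1).foldl (fun s n =>
          let e := k + PySem.Int.floordiv (-fpb) 2 + n
          if 0 ≤ e ∧ e ≤ nf - 1 then PySem.Set.add s e else s) s) PySem.Set.empty).Nodup := by
  have step : ∀ (l : List Int) (g : Int → Int) (s : PySem.Set Int), s.Nodup →
      (l.foldl (fun s n => if 0 ≤ g n ∧ g n ≤ nf - 1 then PySem.Set.add s (g n) else s) s).Nodup := by
    intro l g
    induction l with
    | nil => intro s hs; simpa
    | cons n t ih =>
      intro s hs
      simp only [List.foldl_cons]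
      apply ih
      split_ifs with h
      · exact PySem.Set.nodup_add s (g n) hs
      · exact hs
  have outer : ∀ (l : List Int) (s : PySem.Set Int), s.Nodup →
      (l.foldl (fun s k =>
        (PySem.List.pyRange 0 fpb 1).foldl (fun s n =>
          let e := k + PySem.Int.floordiv (-fpb) 2 + n
          if 0 ≤ e ∧ e ≤ nf - 1 then PySem.Set.add s e else s) s) s).Nodup := by
    intro l
    induction l with
    | nil => intro s hs; simpa
    | cons k t ih =>
      intro s hs
      simp only [List.foldl_cons]
      exact ih _ (step _ (fun n => k + PySem.Int.floordiv (-fpb) 2 + n) s hs)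
  exact outer keys _ (by simp [PySem.Set.empty])

-- one merge step of B preserves the invariant and unions in the clamp of k
theorem pv_step (half nf fpb k : Int) (m : List (Int × Int))
    (hg : pvGood m) (hb : ∀ p ∈ m, p.1 ≤ pvLo half k ∧ p.2 ≤ pvHi half nf fpb k) :
    let lo := pvLo half k
    let hi := pvHi half nf fpb k
    let m' := if lo > hi then m else pvMergeStep m lo hi
    pvGood m' ∧ (∀ p ∈ m', p.1 ≤ lo ∧ p.2 ≤ hi) ∧
      (∀ x, pvIvMem m' x ↔ pvIvMem m x ∨ (lo ≤ x ∧ x ≤ hi)) := by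
  intro lo hi m'
  by_cases hempty : lo > hi
  · refine ⟨by simpa [m', hempty] using hg, ?_, ?_⟩
    · simpa [m', hempty] using hb
    · intro x; simp only [m', if_pos hempty]
      constructor
      · exact Or.inl
      · rintro (h | h)
        · exact h
        · omega
  · have hle : lo ≤ hi := by omega
    simp only [m', if_neg hempty]
    match m, hg, hb with
    | [], _, _ =>
      refine ⟨⟨by simp [pvMergeStep], by simp [pvMergeStep]; omega⟩, by simp [pvMergeStep], ?_⟩
      intro x; simp [pvMergeStep, pvIvMem]
    | (plo, phi) :: rest, ⟨hpw, hne⟩, hb =>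
      have hplo : plo ≤ lo := (hb _ (List.mem_cons_self)).1
      have hphi : phi ≤ hi := (hb _ (List.mem_cons_self)).2
      have hpne : plo ≤ phi := hne _ List.mem_cons_self
      rw [List.pairwise_cons] at hpw
      by_cases hmerge : lo ≤ phi + 1
      · have hup : pvMergeStep ((plo, phi) :: rest) lo hi
            = (if hi > phi then (plo, hi) :: rest else (plo, phi) :: rest) := by
          simp [pvMergeStep, hmerge]
        by_cases hgt : hi > phi
        · rw [hup, if_pos hgt]
          refine ⟨⟨List.pairwise_cons.mpr ⟨fun b hb' => ?_, hpw.2⟩, ?_⟩, ?_, ?_⟩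
          · have := hpw.1 b hb'; omega
          · intro p hp
            rcases List.mem_cons.mp hp with rfl | hp
            · simp; omega
            · exact hne _ (List.mem_cons_of_mem _ hp)
          · intro p hp
            rcases List.mem_cons.mp hp with rfl | hp
            · simp; omega
            · exact ⟨(hb _ (List.mem_cons_of_mem _ hp)).1, (hb _ (List.mem_cons_of_mem _ hp)).2⟩
          · intro x
            simp only [pvIvMem, List.mem_cons]
            constructor
            · rintro ⟨p, (rfl | hp), hx⟩
              · simp at hx
                by_cases hxp : x ≤ phi
                · exact Or.inl ⟨(plo, phi), Or.inl rfl, by simp; omega⟩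
                · exact Or.inr (by omega)
              · exact Or.inl ⟨p, Or.inr hp, hx⟩
            · rintro (⟨p, (rfl | hp), hx⟩ | hx)
              · exact ⟨(plo, hi), Or.inl rfl, by simp at hx ⊢; omega⟩
              · exact ⟨p, Or.inr hp, hx⟩
              · exact ⟨(plo, hi), Or.inl rfl, by simp; omega⟩
        · rw [hup, if_neg hgt]
          refine ⟨⟨List.pairwise_cons.mpr ⟨hpw.1, hpw.2⟩, hne⟩, hb, ?_⟩
          intro x
          constructor
          · exact Or.inl
          · rintro (h | hx)
            · exact h
            · exact ⟨(plo, phi), List.mem_cons_self, by simp; omega⟩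
      · have hup : pvMergeStep ((plo, phi) :: rest) lo hi = (lo, hi) :: (plo, phi) :: rest := by
          simp [pvMergeStep, hmerge]
        rw [hup]
        refine ⟨⟨List.pairwise_cons.mpr ⟨?_, List.pairwise_cons.mpr hpw⟩, ?_⟩, ?_, ?_⟩
        · intro b hb'
          rcases List.mem_cons.mp hb' with rfl | hb'
          · simp; omega
          · have := hpw.1 b hb'; simp; omega
        · intro p hp
          rcases List.mem_cons.mp hp with rfl | hp
          · simpa
          · exact hne _ hp
        · intro p hp
          rcases List.mem_cons.mp hp with rfl | hp
          · simp
          · exact hb _ hp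
        · intro x
          simp only [pvIvMem, List.mem_cons]
          constructor
          · rintro ⟨p, (rfl | hp), hx⟩
            · exact Or.inr (by simpa using hx)
            · exact Or.inl ⟨p, hp, hx⟩
          · rintro (⟨p, hp, hx⟩ | hx)
            · exact ⟨p, Or.inr hp, hx⟩
            · exact ⟨(lo, hi), Or.inl rfl, by simpa using hx⟩

-- monotonicity of the clamped interval bounds
theorem pv_lo_mono (half k k' : Int) (h : k ≤ k') : pvLo half k ≤ pvLo half k' := by
  simp only [pvLo]; omega

theorem pv_hi_mono (half nf fpb k k' : Int) (h : k ≤ k') :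
    pvHi half nf fpb k ≤ pvHi half nf fpb k' := by
  simp only [pvHi]; omega

-- the fold over strictly increasing keys builds a good interval list covering all clamps
theorem pv_foldl_merge (half nf fpb : Int) :
    ∀ (ks : List Int) (m : List (Int × Int)), ks.Pairwise (· < ·) →
      pvGood m → (∀ p ∈ m, ∀ k ∈ ks, p.1 ≤ pvLo half k ∧ p.2 ≤ pvHi half nf fpb k) →
      pvGood (ks.foldl (fun m k =>
          if pvLo half k > pvHi half nf fpb k then m
          else pvMergeStep m (pvLo half k) (pvHi half nf fpb k)) m) ∧
      ∀ x, pvIvMem (ks.foldl (fun m k =>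
          if pvLo half k > pvHi half nf fpb k then m
          else pvMergeStep m (pvLo half k) (pvHi half nf fpb k)) m) x ↔
        pvIvMem m x ∨ ∃ k ∈ ks, pvLo half k ≤ x ∧ x ≤ pvHi half nf fpb k := by
  intro ks
  induction ks with
  | nil => intro m _ hg _; exact ⟨hg, by simp⟩
  | cons k t ih =>
    intro m hpw hg hb
    rw [List.pairwise_cons] at hpw
    obtain ⟨hg', hb', hmem'⟩ := pv_step half nf fpb k m hg (fun p hp => hb p hp k List.mem_cons_self)
    have hbt : ∀ p ∈ (if pvLo half k > pvHi half nf fpb k then m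
        else pvMergeStep m (pvLo half k) (pvHi half nf fpb k)), ∀ k' ∈ t,
        p.1 ≤ pvLo half k' ∧ p.2 ≤ pvHi half nf fpb k' := by
      intro p hp k' hk'
      have hk : k ≤ k' := le_of_lt (hpw.1 k' hk')
      exact ⟨le_trans (hb' p hp).1 (pv_lo_mono half k k' hk),
             le_trans (hb' p hp).2 (pv_hi_mono half nf fpb k k' hk)⟩
    obtain ⟨hg2, hmem2⟩ := ih _ hpw.2 hg' hbt
    refine ⟨by simpa using hg2, ?_⟩
    intro x
    simp only [List.foldl_cons]
    rw [hmem2, hmem' x]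
    simp only [List.mem_cons]
    constructor
    · rintro ((h | h) | ⟨k', hk', h⟩)
      · exact Or.inl h
      · exact Or.inr ⟨k, Or.inl rfl, h⟩
      · exact Or.inr ⟨k', Or.inr hk', h⟩
    · rintro (h | ⟨k', (rfl | hk'), h⟩)
      · exact Or.inl (Or.inl h)
      · exact Or.inl (Or.inr h)
      · exact Or.inr ⟨k', hk', h⟩

-- flattening a good (reversed) interval list gives a strictly increasing list
theorem pv_out_pairwise (m : List (Int × Int)) (hg : pvGood m) :
    ((m.reverse.foldl (fun out p => out ++ PySem.List.pyRange p.1 (p.2 + 1) 1) [])).Pairwise (· < ·) := by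
  rw [PySem.List.foldl_append_eq_flatMap]
  simp only [List.nil_append]
  rw [List.pairwise_flatMap]
  constructor
  · intro p _; exact PySem.List.pairwise_lt_pyRange_one _ _
  · rw [List.pairwise_reverse]
    exact hg.1.imp (by
      intro a b h x hx y hy
      rw [PySem.List.mem_pyRange_one] at hx hy
      omega)

theorem pv_out_mem (m : List (Int × Int)) (x : Int) :
    x ∈ (m.reverse.foldl (fun out p => out ++ PySem.List.pyRange p.1 (p.2 + 1) 1) []) ↔ pvIvMem m x := by
  rw [PySem.List.foldl_append_eq_flatMap]
  simp [List.mem_flatMap, PySem.List.mem_pyRange_one, pvIvMem]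

-- the two floor-division offsets agree: (-fpb)//2 = -((fpb+1)//2)
theorem pv_offset (fpb : Int) :
    PySem.Int.floordiv (-fpb) 2 = -(PySem.Int.floordiv (fpb + 1) 2) := by
  rw [PySem.Int.floordiv_eq_ediv_of_pos (by norm_num),
      PySem.Int.floordiv_eq_ediv_of_pos (by norm_num)]
  omega

-- ===== VERDICT (by name: the statement is the Claim_ definition above) =====
theorem expand_frame_indexes_spec : Claim_equal_expand_frame_indexes := by
  intro keys fpb nf _
  unfold Spec_expand_frame_indexes expand_frame_indexes expand_frame_indexes_alt
  simp only []
  set c := PySem.Int.floordiv (-fpb) 2 with hc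
  set half := PySem.Int.floordiv (fpb + 1) 2 with hhalf
  have hch : c = -half := pv_offset fpb
  -- A's set
  set aset := keys.foldl (fun s k =>
      (PySem.List.pyRange 0 fpb 1).foldl (fun s n =>
        let e := k + c + n
        if 0 ≤ e ∧ e ≤ nf - 1 then PySem.Set.add s e else s) s) PySem.Set.empty with haset
  by_cases hdeg : fpb ≤ 0 ∨ nf ≤ 0
  · rw [if_pos hdeg]
    have hmem : ∀ x, x ∈ aset ↔ False := by
      intro x
      rw [haset, pv_mem_aset]
      constructor
      · rintro ⟨k, _, h⟩; omega
      · exact False.elim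
    have : aset = [] := List.eq_nil_iff_forall_not_mem.mpr (fun x => (hmem x).mp)
    rw [this]
    rfl
  · rw [if_neg hdeg]
    rw [not_or, not_le, not_le] at hdeg
    -- B's merged intervals
    set ks := PySem.List.sorted (PySem.Set.ofList keys) (fun x => x) false with hks
    have hkspw : ks.Pairwise (· < ·) := PySem.List.sorted_ofList_pairwise_lt keys
    have hstepeq : (fun (m : List (Int × Int)) (k : Int) =>
        let lo := max 0 (k - half)
        let hi := min (nf - 1) (k - half + fpb - 1)
        if lo > hi then m else pvMergeStep m lo hi)
      = fun m k => if pvLo half k > pvHi half nf fpb k then m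
          else pvMergeStep m (pvLo half k) (pvHi half nf fpb k) := rfl
    rw [hstepeq]
    obtain ⟨hgood, hunion⟩ := pv_foldl_merge half nf fpb ks [] hkspw
      ⟨List.Pairwise.nil, by simp⟩ (by simp)
    set merged := ks.foldl (fun m k =>
        if pvLo half k > pvHi half nf fpb k then m
        else pvMergeStep m (pvLo half k) (pvHi half nf fpb k)) [] with hmerged
    set L := merged.reverse.foldl (fun out p => out ++ PySem.List.pyRange p.1 (p.2 + 1) 1) [] with hL
    have hLpw : L.Pairwise (· < ·) := pv_out_pairwise merged hgood
    have hLmem : ∀ x, x ∈ L ↔ x ∈ aset := by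
      intro x
      rw [hL, pv_out_mem, hunion x, haset, pv_mem_aset]
      simp only [pvIvMem, List.not_mem_nil, false_and, exists_const, false_or]
      constructor
      · rintro ⟨k, hk, h⟩
        refine ⟨k, ?_, ?_⟩
        · rw [hks, PySem.List.mem_sorted, PySem.Set.mem_ofList] at hk; exact hk
        · simp only [pvLo, pvHi] at h; omega
      · rintro ⟨k, hk, h⟩
        refine ⟨k, ?_, ?_⟩
        · rw [hks, PySem.List.mem_sorted, PySem.Set.mem_ofList]; exact hk
        · simp only [pvLo, pvHi]; omega
    have hLnd : L.Nodup := hLpw.imp (fun h => ne_of_lt h)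
    have hand : aset.Nodup := pv_nodup_aset keys fpb nf
    have hperm : L.Perm aset := (List.perm_ext_iff_of_nodup hLnd hand).mpr hLmem
    exact PySem.List.sorted_eq_of_perm_of_pairwise_lt aset L (fun x => x) hperm hLpw
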